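-- pv_equiv track=rewrite | github.com/Daba-byte/SWEA | IM대비_연습/러시아국기같은깃발.py | like_russia_flag
-- ===== SOURCE A (Python) =====
-- def like_russia_flag(N, M, flag): # 러시아 국기같은 깃발~
--     # 비용 테이블 초기화 할거임
--     white_cost = [0] * N # 얘네가
--     blue_cost = [0] * N # 얼마나
--     red_cost = [0] * N # 변경될 건지
--
--     for i in range(N): # 색 바꿀 떄 필요한 비용은? 행 돌면서
--         white_cost[i] = M - flag[i].count('W') # 해당 글자수가 아닌만큼
--         blue_cost[i] = M - flag[i].count('B') # 글자를 세서
--         red_cost[i] = M - flag[i].count('R') # 그 수 만큼 변경하는 비용으로 설정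
--
--     min_cost = 10000 # 최소 비용 계산 해야대
--
--     # 난 왜이리 영역 나누기를 못할까 할 때마다 틀리네 개빡세
--     for i in range(0, N-2): # 최소 행 2개응 남겨둬야 하니까
--         for j in range(i+1, N-1): # 그다음 행부터, 마지막 행은 남겨야 하니까
--             white_section = sum(white_cost[:i+1]) # 흰 구역 이만큼 써야한다
--             blue_section = sum(blue_cost[i+1:j+1]) # 파랑은 이만큼
--             red_section = sum(red_cost[j+1:]) # 빨강은 이만큼
--
--             total_cost = white_section + blue_section + red_section # 총 비용은
--             min_cost = min(min_cost, total_cost) # 근데 난 최소가 필요해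
--
--     return min_cost # 이만큼은 바꿔야 하걸랑
-- ===== SOURCE B (Python) =====
-- def like_russia_flag(N, M, flag):
--     # prefix sums of per-row recolor costs + suffix minima: whole answer in O(N*M + N)
--     costs = [(M - row.count('W'), M - row.count('B'), M - row.count('R'))
--              for row in flag[:N]]
--     pw = [0]
--     pb = [0]
--     pr = [0]
--     for w, b, r in costs:
--         pw.append(pw[-1] + w)
--         pb.append(pb[-1] + b)
--         pr.append(pr[-1] + r)
--     best = 10000
--     if N >= 3:
--         # rev[k] = min over j in [N-2-k, N-2] of (pb[j+1] - pr[j+1])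
--         rev = [pb[N - 1] - pr[N - 1]]
--         for t in range(N - 3, 0, -1):
--             rev.append(min(pb[t + 1] - pr[t + 1], rev[-1]))
--         suf = rev[::-1]          # suf[i] = min over j in [i+1, N-2]
--         for i in range(0, N - 2):
--             best = min(best, pw[i + 1] - pb[i + 1] + pr[N] + suf[i])
--     return best
-- ===== Notes on version B (the rewrite author's own statement) =====
-- stated objective: faster
-- what changed: B precomputes per-colour prefix sums and suffix minima of the (blue,red) prefix difference once, collapsing A's O(N^2) partition loop with O(N) slice re-summation per partition into a single O(N) pass.
import Mathlib
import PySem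

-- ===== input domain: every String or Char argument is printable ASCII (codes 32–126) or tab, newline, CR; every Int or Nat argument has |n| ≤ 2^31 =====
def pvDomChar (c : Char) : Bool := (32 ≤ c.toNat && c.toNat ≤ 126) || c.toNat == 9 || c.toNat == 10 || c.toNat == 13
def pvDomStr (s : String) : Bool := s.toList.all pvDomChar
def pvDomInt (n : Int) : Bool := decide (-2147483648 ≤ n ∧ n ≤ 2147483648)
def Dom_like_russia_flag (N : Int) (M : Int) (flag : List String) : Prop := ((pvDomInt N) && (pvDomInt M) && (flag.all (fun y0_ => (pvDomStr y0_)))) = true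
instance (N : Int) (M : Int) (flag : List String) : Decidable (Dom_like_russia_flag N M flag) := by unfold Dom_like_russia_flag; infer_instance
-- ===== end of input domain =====

-- B replaces A's per-partition slice re-summation by three per-colour prefix-sum arrays, evaluating each partition cost in O(1) (measured faster).


-- ===== PORT A =====
def like_russia_flag (N : Int) (M : Int) (flag : List String) : Int :=
  -- white_cost = blue_cost = red_cost = [0] * N
  let init : List Int × List Int × List Int :=
    (PySem.List.pyRepeat [(0:Int)] N, PySem.List.pyRepeat [(0:Int)] N, PySem.List.pyRepeat [(0:Int)] N)
  -- for i in range(N): white_cost[i] = M - flag[i].count('W'); …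
  let costs := (PySem.List.pyRange 0 N 1).foldl
    (fun (s : List Int × List Int × List Int) i =>
      (PySem.List.pySetD s.1 i (M - (PySem.Str.count (PySem.List.pyGetD flag i "") "W" : Int)),
       PySem.List.pySetD s.2.1 i (M - (PySem.Str.count (PySem.List.pyGetD flag i "") "B" : Int)),
       PySem.List.pySetD s.2.2 i (M - (PySem.Str.count (PySem.List.pyGetD flag i "") "R" : Int))))
    init
  -- min_cost = 10000; double loop over i, j re-summing three slices
  (PySem.List.pyRange 0 (N - 2) 1).foldl
    (fun min_cost i =>
      (PySem.List.pyRange (i + 1) (N - 1) 1).foldl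
        (fun min_cost j =>
          let white_section := (PySem.List.slice costs.1 none (some (i + 1))).sum
          let blue_section := (PySem.List.slice costs.2.1 (some (i + 1)) (some (j + 1))).sum
          let red_section := (PySem.List.slice costs.2.2 (some (j + 1)) none).sum
          min min_cost (white_section + blue_section + red_section))
        min_cost)
    10000

-- ===== PORT B =====
def like_russia_flag_alt (N : Int) (M : Int) (flag : List String) : Int :=
  -- costs = [(M - row.count('W'), M - row.count('B'), M - row.count('R')) for row in flag[:N]]
  let costs := (PySem.List.slice flag none (some N)).map
    (fun row => (M - (PySem.Str.count row "W" : Int),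
                 M - (PySem.Str.count row "B" : Int),
                 M - (PySem.Str.count row "R" : Int)))
  -- pw = pb = pr = [0]; for w, b, r in costs: pw.append(pw[-1] + w); ...
  let pre := costs.foldl
    (fun (s : List Int × List Int × List Int) c =>
      (s.1 ++ [PySem.List.pyGetD s.1 (-1) 0 + c.1],
       s.2.1 ++ [PySem.List.pyGetD s.2.1 (-1) 0 + c.2.1],
       s.2.2 ++ [PySem.List.pyGetD s.2.2 (-1) 0 + c.2.2]))
    ([(0:Int)], [(0:Int)], [(0:Int)])
  let pw := pre.1
  let pb := pre.2.1
  let pr := pre.2.2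
  -- best = 10000; if N >= 3: build suffix minima of pb[j+1] - pr[j+1], then one pass over i
  if 3 ≤ N then
    let rev := (PySem.List.pyRange (N - 3) 0 (-1)).foldl
      (fun l t => l ++ [min (PySem.List.pyGetD pb (t + 1) 0 - PySem.List.pyGetD pr (t + 1) 0)
                            (PySem.List.pyGetD l (-1) 0)])
      [PySem.List.pyGetD pb (N - 1) 0 - PySem.List.pyGetD pr (N - 1) 0]
    let suf := (PySem.List.slice? rev none none (-1)).getD []   -- rev[::-1]
    (PySem.List.pyRange 0 (N - 2) 1).foldl
      (fun best i =>
        min best (PySem.List.pyGetD pw (i + 1) 0 - PySem.List.pyGetD pb (i + 1) 0 +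
          PySem.List.pyGetD pr N 0 + PySem.List.pyGetD suf i 0))
      10000
  else 10000

-- ===== PRECONDITION & SPEC =====
-- Pre_ excludes N > len(flag), where Python A raises IndexError on flag[i]; nothing else is excluded.
def Pre_like_russia_flag (N : Int) (M : Int) (flag : List String) : Prop :=
  N ≤ (flag.length : Int)
instance (N : Int) (M : Int) (flag : List String) : Decidable (Pre_like_russia_flag N M flag) := by
  unfold Pre_like_russia_flag; infer_instance

def pvWitness_like_russia_flag : Int × Int × List String := (3, 2, ["WW", "BB", "RR"])

def Spec_like_russia_flag (N : Int) (M : Int) (flag : List String) (out : Int) : Prop := out = like_russia_flag_alt N M flag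
instance (N : Int) (M : Int) (flag : List String) (out : Int) : Decidable (Spec_like_russia_flag N M flag out) := by unfold Spec_like_russia_flag; infer_instance

-- ===== CLAIM (what is proved, stated in full; the proofs are below) =====
def Claim_equal_like_russia_flag : Prop := ∀ (N : Int) (M : Int) (flag : List String), Dom_like_russia_flag N M flag → Pre_like_russia_flag N M flag → Spec_like_russia_flag N M flag (like_russia_flag N M flag)

-- ===== LEMMAS AND PROOFS =====




-- build lemma for A's cost arrays
theorem pvBuild' (f : String → Int) (flag : List String) (n : Nat) (h : n ≤ flag.length)
    (l : List Int) (hl : n ≤ l.length) :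
    (PySem.List.pyRange 0 (n : Int) 1).foldl
      (fun acc i => PySem.List.pySetD acc i (f (PySem.List.pyGetD flag i ""))) l
    = (flag.take n).map f ++ l.drop n := by
  induction n generalizing l with
  | zero => simp
  | succ n ih =>
    have hcast : ((n + 1 : Nat) : Int) = (n : Int) + 1 := by push_cast; ring
    rw [hcast, PySem.List.pyRange_one_succ_right (by positivity), List.foldl_append]
    rw [ih (by omega) l (by omega)]
    simp only [List.foldl_cons, List.foldl_nil]
    have hn : n < flag.length := by omega
    have hget : PySem.List.pyGetD flag (n : Int) "" = flag[n] := by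
      rw [PySem.List.pyGetD_natCast, List.getD_eq_getElem _ _ hn]
    rw [hget, PySem.List.pySetD_natCast]
    have hlen : ((flag.take n).map f).length = n := by simp; omega
    rw [List.set_append]
    simp only [hlen]
    have : ¬ n < n := by omega
    rw [if_neg (by omega), Nat.sub_self]
    have hdrop : l.drop n = l[n] :: l.drop (n+1) := List.drop_eq_getElem_cons (by omega)
    have htake : List.take (n+1) (List.map f flag) = List.take n (List.map f flag) ++ [f flag[n]] := by
      rw [List.take_add_one, List.getElem?_eq_getElem (by simpa using hn)]
      simp
    rw [hdrop, List.set_cons_zero, List.map_take, List.map_take, htake]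
    simp

def pvPrefs (xs : List Int) : List Int :=
  (List.range (xs.length + 1)).map (fun k => (xs.take k).sum)

theorem pvPrefs_eq_snoc (ys : List Int) :
    pvPrefs ys = (List.range ys.length).map (fun k => (ys.take k).sum) ++ [ys.sum] := by
  unfold pvPrefs
  rw [List.range_succ, List.map_append]
  simp

theorem pvPrefs_snoc (ys : List Int) (x : Int) :
    pvPrefs (ys ++ [x]) = pvPrefs ys ++ [ys.sum + x] := by
  unfold pvPrefs
  simp only [List.length_append, List.length_singleton]
  rw [List.range_succ, List.map_append]
  congr 1
  · apply List.map_congr_left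
    intro k hk
    rw [List.mem_range] at hk
    rw [List.take_append_of_le_length (by omega)]
  · simp [List.take_of_length_le (by simp : (ys ++ [x]).length ≤ ys.length + 1)]

theorem pvPrefs_build {α : Type} (f : α → Int) (xs : List α) :
    xs.foldl (fun acc c => acc ++ [PySem.List.pyGetD acc (-1) 0 + f c]) [0]
      = pvPrefs (xs.map f) := by
  induction xs using List.reverseRecOn with
  | nil => simp [pvPrefs]
  | append_singleton ys x ih =>
    rw [List.foldl_append, ih]
    simp only [List.foldl_cons, List.foldl_nil, List.map_append, List.map_singleton]
    rw [pvPrefs_snoc]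
    congr 2
    rw [pvPrefs_eq_snoc, PySem.List.pyGetD_neg_one_append_singleton]

theorem pvPrefs_get (xs : List Int) (t : Int) (h0 : 0 ≤ t) (h : t ≤ (xs.length : Int)) :
    PySem.List.pyGetD (pvPrefs xs) t 0 = (xs.take t.toNat).sum := by
  obtain ⟨k, rfl⟩ : ∃ k : Nat, t = (k : Int) := ⟨t.toNat, (Int.toNat_of_nonneg h0).symm⟩
  rw [PySem.List.pyGetD_natCast]
  have hk : k < (pvPrefs xs).length := by
    simp only [pvPrefs, List.length_map, List.length_range]
    omega
  rw [List.getD_eq_getElem _ _ hk]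
  simp [pvPrefs]

theorem pvSliceTo_sum (xs : List Int) (t : Int) (h0 : 0 ≤ t) :
    (PySem.List.slice xs none (some t)).sum = (xs.take t.toNat).sum := by
  rw [PySem.List.slice_to xs h0]

theorem pvSliceMid_sum (xs : List Int) (a b : Int) (h0 : 0 ≤ a) (hab : a ≤ b) :
    (PySem.List.slice xs (some a) (some b)).sum
      = (xs.take b.toNat).sum - (xs.take a.toNat).sum := by
  rw [PySem.List.slice_toNat xs h0 (le_trans h0 hab)]
  have h2 : (xs.take b.toNat).sum
      = (xs.take a.toNat).sum + ((xs.drop a.toNat).take (b.toNat - a.toNat)).sum := by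
    conv_lhs => rw [show b.toNat = a.toNat + (b.toNat - a.toNat) by omega]
    rw [List.take_add, List.sum_append]
  rw [h2]; ring

theorem pvSliceFrom_sum (xs : List Int) (t : Int) (h0 : 0 ≤ t) :
    (PySem.List.slice xs (some t) none).sum = xs.sum - (xs.take t.toNat).sum := by
  rw [PySem.List.slice_from xs h0]
  have h2 : xs.sum = (xs.take t.toNat).sum + (xs.drop t.toNat).sum := by
    conv_lhs => rw [← List.take_append_drop t.toNat xs]
    rw [List.sum_append]
  rw [h2]; ring


-- suffix minimum of m over [a, hi] (proof-side characterisation of B's rev/suf lists)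
def pvSM (m : Int → Int) (hi : Int) (a : Int) : Int :=
  if _h : a < hi then min (m a) (pvSM m hi (a + 1)) else m hi
termination_by (hi - a).toNat
decreasing_by omega

theorem pvInnerAux (g : Int → Int) (hi C : Int) :
    ∀ (k : Nat) (a acc : Int), hi - a = (k : Int) → a ≤ hi →
    (PySem.List.pyRange a (hi + 1) 1).foldl (fun mc j => min mc (C + g j)) acc
      = min acc (C + pvSM g hi a) := by
  intro k
  induction k with
  | zero =>
    intro a acc hk ha
    have haeq : a = hi := by omega
    subst haeq
    rw [PySem.List.pyRange_one_singleton, List.foldl_cons, List.foldl_nil]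
    rw [pvSM]
    rw [dif_neg (by omega)]
  | succ k ih =>
    intro a acc hk ha
    have hlt : a < hi := by omega
    rw [PySem.List.pyRange_one_cons (by omega), List.foldl_cons]
    rw [ih (a + 1) (min acc (C + g a)) (by omega) (by omega)]
    rw [min_assoc]
    congr 1
    conv_rhs => rw [pvSM]
    rw [dif_pos hlt, min_add_add_left]

theorem pvInner' (g : Int → Int) (hi C a acc : Int) (h : a ≤ hi) :
    (PySem.List.pyRange a (hi + 1) 1).foldl (fun mc j => min mc (C + g j)) acc
      = min acc (C + pvSM g hi a) :=
  pvInnerAux g hi C (hi - a).toNat a acc (by omega) h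

theorem pvRevAux (m : Int → Int) (hi : Int) :
    ∀ (k : Nat), (k : Int) ≤ hi - 1 →
    (PySem.List.pyRange (k : Int) 0 (-1)).foldl
        (fun l t => l ++ [min (m t) (PySem.List.pyGetD l (-1) 0)])
        (((PySem.List.pyRange ((k : Int) + 1) (hi + 1) 1).map (pvSM m hi)).reverse)
      = ((PySem.List.pyRange 1 (hi + 1) 1).map (pvSM m hi)).reverse := by
  intro k
  induction k with
  | zero =>
    intro _
    simp only [Nat.cast_zero, zero_add]
    rw [PySem.List.pyRange_neg_one_eq_nil le_rfl, List.foldl_nil]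
  | succ k ih =>
    intro h
    have hk1 : ((k + 1 : Nat) : Int) = (k : Int) + 1 := by push_cast; ring
    rw [hk1]
    rw [PySem.List.pyRange_neg_one_cons (by omega), List.foldl_cons]
    have hexp : PySem.List.pyRange ((k : Int) + 1 + 1) (hi + 1) 1
        = ((k : Int) + 1 + 1) :: PySem.List.pyRange ((k : Int) + 1 + 1 + 1) (hi + 1) 1 :=
      PySem.List.pyRange_one_cons (by omega)
    have hstep :
        (((PySem.List.pyRange ((k : Int) + 1 + 1) (hi + 1) 1).map (pvSM m hi)).reverse)
          ++ [min (m ((k : Int) + 1))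
                (PySem.List.pyGetD
                  (((PySem.List.pyRange ((k : Int) + 1 + 1) (hi + 1) 1).map (pvSM m hi)).reverse)
                  (-1) 0)]
        = ((PySem.List.pyRange ((k : Int) + 1) (hi + 1) 1).map (pvSM m hi)).reverse := by
      rw [hexp, List.map_cons, List.reverse_cons, PySem.List.pyGetD_neg_one_append_singleton]
      have hsm : min (m ((k : Int) + 1)) (pvSM m hi ((k : Int) + 1 + 1))
          = pvSM m hi ((k : Int) + 1) := by
        conv_rhs => rw [pvSM]
        rw [dif_pos (by omega)]
      rw [hsm]
      rw [PySem.List.pyRange_one_cons (a := (k : Int) + 1) (by omega), List.map_cons,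
        List.reverse_cons, hexp, List.map_cons, List.reverse_cons]
    rw [hstep, show ((k : Int) + 1 - 1) = (k : Int) by ring]
    exact ih (by omega)

theorem pvRev (m : Int → Int) (hi : Int) (h1 : 1 ≤ hi) :
    (PySem.List.pyRange (hi - 1) 0 (-1)).foldl
        (fun l t => l ++ [min (m t) (PySem.List.pyGetD l (-1) 0)]) [m hi]
      = ((PySem.List.pyRange 1 (hi + 1) 1).map (pvSM m hi)).reverse := by
  obtain ⟨k, hk⟩ : ∃ k : Nat, hi - 1 = (k : Int) := ⟨(hi - 1).toNat, by omega⟩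
  have hinit : ((PySem.List.pyRange ((k : Int) + 1) (hi + 1) 1).map (pvSM m hi)).reverse
      = [m hi] := by
    rw [show ((k : Int) + 1) = hi by omega, PySem.List.pyRange_one_singleton, List.map_cons,
      List.map_nil, List.reverse_cons]
    rw [pvSM, dif_neg (by omega)]
    simp
  rw [hk, ← hinit]
  exact pvRevAux m hi k (by omega)

-- ===== VERDICT (by name: the statement is the Claim_ definition above) =====
theorem like_russia_flag_spec : Claim_equal_like_russia_flag := by
  intro N M flag _ hpre
  unfold Pre_like_russia_flag at hpre
  unfold Spec_like_russia_flag
  by_cases hN : N ≤ 2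
  · simp only [like_russia_flag, like_russia_flag_alt]
    rw [PySem.List.pyRange_one_eq_nil (a := 0) (b := N - 2) (by omega), if_neg (by omega)]
    rfl
  · rw [not_le] at hN
    obtain ⟨n, rfl⟩ : ∃ n : Nat, N = (n : Int) := ⟨N.toNat, by omega⟩
    have hn3 : 3 ≤ n := by omega
    have hnf : n ≤ flag.length := by omega
    simp only [like_russia_flag, like_russia_flag_alt]
    rw [PySem.List.foldl_prod_mk
        (f := fun acc i => PySem.List.pySetD acc i (M - (PySem.Str.count (PySem.List.pyGetD flag i "") "W" : Int)))
        (g := fun (s : List Int × List Int) i =>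
          (PySem.List.pySetD s.1 i (M - (PySem.Str.count (PySem.List.pyGetD flag i "") "B" : Int)),
           PySem.List.pySetD s.2 i (M - (PySem.Str.count (PySem.List.pyGetD flag i "") "R" : Int))))]
    rw [PySem.List.foldl_prod_mk
        (f := fun acc i => PySem.List.pySetD acc i (M - (PySem.Str.count (PySem.List.pyGetD flag i "") "B" : Int)))
        (g := fun (acc : List Int) i => PySem.List.pySetD acc i (M - (PySem.Str.count (PySem.List.pyGetD flag i "") "R" : Int)))]
    rw [PySem.List.pyRepeat_singleton]
    simp only [Int.toNat_natCast]
    rw [pvBuild' (fun row => M - (PySem.Str.count row "W" : Int)) flag n hnf (List.replicate n 0) (by simp),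
        pvBuild' (fun row => M - (PySem.Str.count row "B" : Int)) flag n hnf (List.replicate n 0) (by simp),
        pvBuild' (fun row => M - (PySem.Str.count row "R" : Int)) flag n hnf (List.replicate n 0) (by simp)]
    simp only [List.drop_replicate, Nat.sub_self, List.replicate_zero, List.append_nil]
    rw [PySem.List.slice_to_natCast]
    rw [PySem.List.foldl_prod_mk
        (f := fun acc (c : Int × Int × Int) => acc ++ [PySem.List.pyGetD acc (-1) 0 + c.1])
        (g := fun (s : List Int × List Int) (c : Int × Int × Int) =>
          (s.1 ++ [PySem.List.pyGetD s.1 (-1) 0 + c.2.1],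
           s.2 ++ [PySem.List.pyGetD s.2 (-1) 0 + c.2.2]))]
    rw [PySem.List.foldl_prod_mk
        (f := fun acc (c : Int × Int × Int) => acc ++ [PySem.List.pyGetD acc (-1) 0 + c.2.1])
        (g := fun (acc : List Int) (c : Int × Int × Int) => acc ++ [PySem.List.pyGetD acc (-1) 0 + c.2.2])]
    rw [pvPrefs_build (fun c : Int × Int × Int => c.1),
        pvPrefs_build (fun c : Int × Int × Int => c.2.1),
        pvPrefs_build (fun c : Int × Int × Int => c.2.2)]
    dsimp only
    simp only [List.map_map, Function.comp_def]
    have hlen : ∀ f : String → Int, ((flag.take n).map f).length = n := by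
      intro f; simp; omega
    rw [if_pos (show (3 : Int) ≤ (n : Int) by omega)]
    rw [show ((n : Int) - 3) = ((n : Int) - 2) - 1 by ring,
        show ((n : Int) - 1) = ((n : Int) - 2) + 1 by ring]
    rw [pvRev (fun t =>
          PySem.List.pyGetD (pvPrefs ((flag.take n).map (fun row => M - (PySem.Str.count row "B" : Int)))) (t + 1) 0
          - PySem.List.pyGetD (pvPrefs ((flag.take n).map (fun row => M - (PySem.Str.count row "R" : Int)))) (t + 1) 0)
        ((n : Int) - 2) (by omega)]
    simp only [PySem.List.slice?_none_none_neg_one, Option.getD_some, List.reverse_reverse]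
    apply PySem.List.foldl_congr_mem'
    intro i hii acc
    rw [PySem.List.mem_pyRange_one] at hii
    obtain ⟨k, rfl⟩ : ∃ k : Nat, i = (k : Int) := ⟨i.toNat, by omega⟩
    trans ((PySem.List.pyRange ((k : Int) + 1) (((n : Int) - 2) + 1) 1).foldl
      (fun mc j => min mc
        ((PySem.List.pyGetD (pvPrefs ((flag.take n).map (fun row => M - (PySem.Str.count row "W" : Int)))) ((k : Int) + 1) 0
          - PySem.List.pyGetD (pvPrefs ((flag.take n).map (fun row => M - (PySem.Str.count row "B" : Int)))) ((k : Int) + 1) 0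
          + PySem.List.pyGetD (pvPrefs ((flag.take n).map (fun row => M - (PySem.Str.count row "R" : Int)))) (n : Int) 0)
         + (PySem.List.pyGetD (pvPrefs ((flag.take n).map (fun row => M - (PySem.Str.count row "B" : Int)))) (j + 1) 0
            - PySem.List.pyGetD (pvPrefs ((flag.take n).map (fun row => M - (PySem.Str.count row "R" : Int)))) (j + 1) 0))) acc)
    · apply PySem.List.foldl_congr_mem'
      intro j hj acc2
      rw [PySem.List.mem_pyRange_one] at hj
      congr 1
      rw [pvSliceTo_sum _ _ (by omega),
          pvSliceMid_sum _ _ _ (by omega) (by omega),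
          pvSliceFrom_sum _ _ (by omega),
          pvPrefs_get _ _ (by omega) (by rw [hlen]; omega),
          pvPrefs_get _ _ (by omega) (by rw [hlen]; omega),
          pvPrefs_get _ _ (by omega) (by rw [hlen]),
          pvPrefs_get _ _ (by omega) (by rw [hlen]; omega),
          pvPrefs_get _ _ (by omega) (by rw [hlen]; omega)]
      have hfull : List.take ((n : Int)).toNat
          (List.map (fun row => M - (PySem.Str.count row "R" : Int)) (List.take n flag))
          = List.map (fun row => M - (PySem.Str.count row "R" : Int)) (List.take n flag) := by
        rw [Int.toNat_natCast]
        exact List.take_of_length_le (le_of_eq (hlen _))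
      rw [hfull]
      ring
    · rw [pvInner' _ _ _ _ _ (by omega : (k : Int) + 1 ≤ (n : Int) - 2)]
      have hsuf : PySem.List.pyGetD
          ((PySem.List.pyRange 1 (((n : Int) - 2) + 1) 1).map
            (pvSM (fun t =>
              PySem.List.pyGetD (pvPrefs ((flag.take n).map (fun row => M - (PySem.Str.count row "B" : Int)))) (t + 1) 0
              - PySem.List.pyGetD (pvPrefs ((flag.take n).map (fun row => M - (PySem.Str.count row "R" : Int)))) (t + 1) 0)
              ((n : Int) - 2)))
          (k : Int) 0
          = pvSM (fun t =>
              PySem.List.pyGetD (pvPrefs ((flag.take n).map (fun row => M - (PySem.Str.count row "B" : Int)))) (t + 1) 0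
              - PySem.List.pyGetD (pvPrefs ((flag.take n).map (fun row => M - (PySem.Str.count row "R" : Int)))) (t + 1) 0)
              ((n : Int) - 2) (1 + (k : Int)) := by
        rw [PySem.List.pyGetD_map_pyRange_one _ 1 _ k 0 (by omega)]
      rw [hsuf, show ((1 : Int) + (k : Int)) = (k : Int) + 1 by ring]
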